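-- pv_equiv track=rewrite | github.com/pandaseal/advent-of-code | day14/solutions.py | get_start_graph
-- ===== SOURCE A (Python) =====
-- from collections import defaultdict
--
-- def get_dimensions_from_paths(paths) -> list:
--     min_x = 10000000000
--     min_y = 0 # ! special case
--     max_x, max_y = 0, 0
--     for path in paths:
--         for [x, y] in path:
--             if x < min_x:
--                 min_x = x
--             if x > max_x:
--                 max_x = x
--             if y < min_y:
--                 min_y = y
--             if y > max_y:
--                 max_y = y
--     return [min_x, max_x, min_y, max_y]
--
-- def get_start_graph(paths) -> defaultdict:
--     [min_x, max_x, min_y, max_y] = get_dimensions_from_paths(paths)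
--     graph = defaultdict(defaultdict)
--     for x in range(min_x, max_x+1):
--         for y in range(min_y, max_y+1):
--             graph[x][y] = '.'
--
--     for path in paths:
--         for i in range(len(path)-1):
--             [start_x, start_y] = path[i]
--             [end_x, end_y] = path[i+1]
--             if start_x == end_x:
--                 fr = min([start_y, end_y])
--                 to = max([start_y, end_y])
--                 for y in range(fr, to+1):
--                     graph[start_x][y] = '#'
--             elif start_y == end_y:
--                 fr = min([start_x, end_x])
--                 to = max([start_x, end_x])
--                 for x in range(fr, to+1):
--                     graph[x][start_y] = '#'
--     return graph, [min_x, max_x, min_y, max_y]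
-- ===== SOURCE B (Python) =====
-- from collections import defaultdict
--
-- def get_start_graph(paths):
--     # Normalise every axis-aligned wall segment into an inclusive box
--     # (lo_x, lo_y, hi_x, hi_y); a cell is rock iff some box covers it.
--     boxes = []
--     for path in paths:
--         for (ax, ay), (bx, by) in zip(path, path[1:]):
--             if ax == bx or ay == by:
--                 boxes.append((min(ax, bx), min(ay, by), max(ax, bx), max(ay, by)))
--     xs = [x for path in paths for x, _ in path]
--     ys = [y for path in paths for _, y in path]
--     min_x, max_x = min(xs), max(xs)
--     # the grid always contains the sand-source row y = 0
--     min_y, max_y = min(0, min(ys)), max(0, max(ys))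
--     graph = defaultdict(defaultdict)
--     for x in range(min_x, max_x + 1):
--         row = defaultdict()
--         for y in range(min_y, max_y + 1):
--             rock = any(lx <= x <= hx and ly <= y <= hy for (lx, ly, hx, hy) in boxes)
--             row[y] = '#' if rock else '.'
--         graph[x] = row
--     return graph, [min_x, max_x, min_y, max_y]
-- ===== Notes on version B (the rewrite author's own statement) =====
-- stated objective: alternative
-- what changed: B never rasterises segments into grid cells: it normalises each axis-aligned segment into one inclusive box and decides every grid cell by a per-cell coverage test over the box list, computing the bounds with min/max over the flattened coordinates, instead of A's paint-everything-'.'-then-overwrite-segment-cells two-phase mutation; Pre_ additionally excludes inputs without any point, on which B's min()/max() raise ValueError.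
-- intended difference: On inputs whose points all have negative x, A pads the x range up to its accidental max_x seed 0 (extra all-'.' columns and dims max_x = 0) while B returns the true bounding box with max_x = max(xs), which is the intended bounding box. — e.g. on get_start_graph([[[-1, 0]]]): A returns ([(-1, [(0, ".")]), (0, [(0, ".")])], [-1, 0, 0, 0]), B returns ([(-1, [(0, ".")])], [-1, -1, 0, 0])
-- outside the precondition, e.g. on get_start_graph([]): A returns ({}, [10000000000, 0, 0, 0]), B raises ValueError; on get_start_graph([[]]): A returns ({}, [10000000000, 0, 0, 0]), B raises ValueError
import Mathlib
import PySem

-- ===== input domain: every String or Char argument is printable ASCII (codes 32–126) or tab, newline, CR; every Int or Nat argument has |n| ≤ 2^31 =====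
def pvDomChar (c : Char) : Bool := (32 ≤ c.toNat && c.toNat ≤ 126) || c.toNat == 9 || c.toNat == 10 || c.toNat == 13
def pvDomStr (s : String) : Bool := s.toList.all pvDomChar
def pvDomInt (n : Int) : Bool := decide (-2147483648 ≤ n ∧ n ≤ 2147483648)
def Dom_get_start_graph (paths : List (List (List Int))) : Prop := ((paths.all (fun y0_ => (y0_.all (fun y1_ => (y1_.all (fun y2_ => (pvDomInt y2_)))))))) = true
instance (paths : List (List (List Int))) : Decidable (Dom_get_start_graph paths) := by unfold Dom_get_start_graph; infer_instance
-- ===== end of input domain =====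

-- B normalises every axis-aligned segment into an inclusive box once and decides each
-- grid cell by a per-cell coverage test over those boxes, instead of A's rasterising
-- paint (fill with '.', then overwrite every segment cell); alternative algorithm.

-- ===== PORT A =====

-- `[x, y] = p` sequence unpacking of a 2-point list; the fallback is unreachable
-- under Pre_ (Python raises ValueError on points whose length is not 2)
def pvUnpack2 (p : List Int) : Int × Int :=
  match p with
  | [x, y] => (x, y)
  | _ => (0, 0)

-- `graph[x][y] = v` on A's defaultdict-of-defaultdicts: a missing outer key is
-- created (appended) with an empty inner dict, then the inner assignment is done
def pvSetCell (g : PySem.Dict Int (PySem.Dict Int String)) (x y : Int) (v : String) :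
    PySem.Dict Int (PySem.Dict Int String) :=
  g.insert x ((g.getD x PySem.Dict.empty).insert y v)

def get_dimensions_from_paths (paths : List (List (List Int))) : List Int :=
  let st :=
    paths.foldl (fun st path =>
      path.foldl (fun (st : Int × Int × Int × Int) p =>
        let (x, y) := pvUnpack2 p
        let (min_x, max_x, min_y, max_y) := st
        let min_x := if x < min_x then x else min_x
        let max_x := if x > max_x then x else max_x
        let min_y := if y < min_y then y else min_y
        let max_y := if y > max_y then y else max_y
        (min_x, max_x, min_y, max_y)) st)
      ((10000000000 : Int), (0 : Int), (0 : Int), (0 : Int))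
  [st.1, st.2.1, st.2.2.1, st.2.2.2]

def get_start_graph (paths : List (List (List Int))) :
    (List (Int × List (Int × String))) × List Int :=
  match get_dimensions_from_paths paths with
  | [min_x, max_x, min_y, max_y] =>
    let graph :=
      (PySem.List.pyRange min_x (max_x + 1) 1).foldl (fun g x =>
        (PySem.List.pyRange min_y (max_y + 1) 1).foldl (fun g y =>
          pvSetCell g x y ".") g) PySem.Dict.empty
    let graph :=
      paths.foldl (fun g path =>
        (PySem.List.pyRange 0 (PySem.List.len path - 1) 1).foldl (fun g i =>
          let (start_x, start_y) := pvUnpack2 (PySem.List.pyGetD path i [])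
          let (end_x, end_y) := pvUnpack2 (PySem.List.pyGetD path (i + 1) [])
          if start_x = end_x then
            let fr := min start_y end_y
            let to_ := max start_y end_y
            (PySem.List.pyRange fr (to_ + 1) 1).foldl (fun g y => pvSetCell g start_x y "#") g
          else if start_y = end_y then
            let fr := min start_x end_x
            let to_ := max start_x end_x
            (PySem.List.pyRange fr (to_ + 1) 1).foldl (fun g x => pvSetCell g x start_y "#") g
          else g) g) graph
    (graph.items.map (fun p => (p.1, p.2.items)), [min_x, max_x, min_y, max_y])
  | _ => ([], [])  -- unreachable: get_dimensions_from_paths always returns 4 elements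

-- ===== PORT B =====

def get_start_graph_alt (paths : List (List (List Int))) :
    (List (Int × List (Int × String))) × List Int :=
  let boxes : List (Int × Int × Int × Int) :=
    paths.foldl (fun bs path =>
      (path.zip (PySem.List.slice path (some 1) none)).foldl (fun bs pq =>
        let (ax, ay) := pvUnpack2 pq.1
        let (bx, by_) := pvUnpack2 pq.2
        if ax = bx ∨ ay = by_ then
          bs ++ [(min ax bx, min ay by_, max ax bx, max ay by_)]
        else bs) bs) []
  let xs := paths.flatMap (fun path => path.map (fun p => (pvUnpack2 p).1))
  let ys := paths.flatMap (fun path => path.map (fun p => (pvUnpack2 p).2))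
  -- min(xs)/max(xs): defaults unreachable under Pre_ (some point exists)
  let min_x := PySem.List.minD xs id 0
  let max_x := PySem.List.maxD xs id 0
  let min_y := min 0 (PySem.List.minD ys id 0)
  let max_y := max 0 (PySem.List.maxD ys id 0)
  let graph :=
    (PySem.List.pyRange min_x (max_x + 1) 1).foldl (fun g x =>
      let row :=
        (PySem.List.pyRange min_y (max_y + 1) 1).foldl (fun r y =>
          r.insert y (if boxes.any (fun b =>
              decide (b.1 ≤ x) && decide (x ≤ b.2.2.1) &&
              (decide (b.2.1 ≤ y) && decide (y ≤ b.2.2.2)))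
            then "#" else ".")) PySem.Dict.empty
      g.insert x row) PySem.Dict.empty
  (graph.items.map (fun p => (p.1, p.2.items)), [min_x, max_x, min_y, max_y])

-- ===== PRECONDITION & SPEC =====

-- Pre_ excludes inputs containing a point list whose length is not 2 (both Pythons
-- raise ValueError unpacking `[x, y] = …`) and inputs containing no point at all,
-- on which B's min()/max() of an empty sequence raise ValueError while A returns a
-- grid built from its bound seeds.
def Pre_get_start_graph (paths : List (List (List Int))) : Prop :=
  (∃ path ∈ paths, path ≠ []) ∧ ∀ path ∈ paths, ∀ p ∈ path, p.length = 2
instance (paths : List (List (List Int))) : Decidable (Pre_get_start_graph paths) := by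
  unfold Pre_get_start_graph; infer_instance

def pvWitness_get_start_graph : List (List (List Int)) := [[[1, 0], [1, 2]], [[0, 2], [2, 2]]]

-- On inputs whose points all have a negative x coordinate, A pads the x range up to the
-- accidental seed max_x = 0 (returning extra all-'.' columns and dims with max_x = 0),
-- while B returns the true bounding box max_x = max(xs); B's value is the intended
-- bounding box (A's x seed, unlike the y = 0 sand-source row, has no domain meaning).
def D_get_start_graph (paths : List (List (List Int))) : Prop :=
  (∃ path ∈ paths, path ≠ []) ∧ ∀ path ∈ paths, ∀ p ∈ path, p.headD 0 < 0
instance (paths : List (List (List Int))) : Decidable (D_get_start_graph paths) := by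
  unfold D_get_start_graph; infer_instance

def Spec_get_start_graph (paths : List (List (List Int)))
    (out : (List (Int × List (Int × String))) × List Int) : Prop :=
  ¬ D_get_start_graph paths → out = get_start_graph_alt paths
instance (paths : List (List (List Int))) (out : (List (Int × List (Int × String))) × List Int) :
    Decidable (Spec_get_start_graph paths out) := by unfold Spec_get_start_graph; infer_instance

def pvDiffWitness_get_start_graph : List (List (List Int)) := [[[-1, 0]]]
def pvDiffWitnessOut_get_start_graph :
    ((List (Int × List (Int × String))) × List Int) × ((List (Int × List (Int × String))) × List Int) :=
  (([(-1, [(0, ".")]), (0, [(0, ".")])], [-1, 0, 0, 0]),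
   ([(-1, [(0, ".")])], [-1, -1, 0, 0]))

-- ===== CLAIM (what is proved, stated in full; the proofs are below) =====
def Claim_unchanged_get_start_graph : Prop := ∀ (paths : List (List (List Int))), Dom_get_start_graph paths → Pre_get_start_graph paths → Spec_get_start_graph paths (get_start_graph paths)
def Claim_changed_get_start_graph : Prop := Dom_get_start_graph (pvDiffWitness_get_start_graph) ∧ Pre_get_start_graph (pvDiffWitness_get_start_graph) ∧ D_get_start_graph (pvDiffWitness_get_start_graph) ∧ get_start_graph (pvDiffWitness_get_start_graph) = pvDiffWitnessOut_get_start_graph.1 ∧ get_start_graph_alt (pvDiffWitness_get_start_graph) = pvDiffWitnessOut_get_start_graph.2 ∧ pvDiffWitnessOut_get_start_graph.1 ≠ pvDiffWitnessOut_get_start_graph.2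
def Claim_exact_get_start_graph : Prop := ∀ (paths : List (List (List Int))), Dom_get_start_graph paths → Pre_get_start_graph paths → D_get_start_graph paths → get_start_graph paths ≠ get_start_graph_alt paths

-- ===== LEMMAS AND PROOFS =====

-- canonical coordinate lists and A's bounds
def pvXs (paths : List (List (List Int))) : List Int :=
  paths.flatten.map (fun p => (pvUnpack2 p).1)
def pvYs (paths : List (List (List Int))) : List Int :=
  paths.flatten.map (fun p => (pvUnpack2 p).2)
def pvMnx (paths : List (List (List Int))) : Int := (pvXs paths).foldl min 10000000000
def pvMxx (paths : List (List (List Int))) : Int := (pvXs paths).foldl max 0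
def pvMny (paths : List (List (List Int))) : Int := (pvYs paths).foldl min 0
def pvMxy (paths : List (List (List Int))) : Int := (pvYs paths).foldl max 0

-- the wall cells of one segment (A's rasterisation) and of all paths
def pvSegCells (p q : List Int) : List (Int × Int) :=
  let (sx, sy) := pvUnpack2 p
  let (ex, ey) := pvUnpack2 q
  if sx = ex then
    (PySem.List.pyRange (min sy ey) (max sy ey + 1) 1).map (fun y => (sx, y))
  else if sy = ey then
    (PySem.List.pyRange (min sx ex) (max sx ex + 1) 1).map (fun x => (x, sy))
  else []
def pvCells (paths : List (List (List Int))) : List (Int × Int) :=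
  paths.flatMap (fun path =>
    (path.zip path.tail).flatMap (fun pq => pvSegCells pq.1 pq.2))

-- B's boxes of one segment and of all paths
def pvSegBoxes (p q : List Int) : List (Int × Int × Int × Int) :=
  let (ax, ay) := pvUnpack2 p
  let (bx, by_) := pvUnpack2 q
  if ax = bx ∨ ay = by_ then [(min ax bx, min ay by_, max ax bx, max ay by_)] else []
def pvBoxes (paths : List (List (List Int))) : List (Int × Int × Int × Int) :=
  paths.flatMap (fun path =>
    (path.zip path.tail).flatMap (fun pq => pvSegBoxes pq.1 pq.2))

def pvCoverB (b : Int × Int × Int × Int) (x y : Int) : Bool :=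
  decide (b.1 ≤ x) && decide (x ≤ b.2.2.1) && (decide (b.2.1 ≤ y) && decide (y ≤ b.2.2.2))

-- the grid with value f x y at cell (x, y)
def pvRowOf (mny mxy : Int) (f : Int → Int → String) (x : Int) : PySem.Dict Int String :=
  PySem.Dict.mk ((PySem.List.pyRange mny (mxy + 1) 1).map (fun y => (y, f x y)))
def pvGridOf (mnx mxx mny mxy : Int) (f : Int → Int → String) :
    PySem.Dict Int (PySem.Dict Int String) :=
  PySem.Dict.mk ((PySem.List.pyRange mnx (mxx + 1) 1).map (fun x => (x, pvRowOf mny mxy f x)))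

def pvMinStep : Option Int → Int → Option Int :=
  fun acc x => match acc with | none => some x | some m => if x < m then some x else some m
def pvMaxStep : Option Int → Int → Option Int :=
  fun acc x => match acc with | none => some x | some m => if m < x then some x else some m

theorem pv_foldl_min_comm (l : List Int) : ∀ a b : Int, l.foldl min (min a b) = min (l.foldl min a) b := by
  induction l with
  | nil => intro a b; simp
  | cons x l ih =>
    intro a b
    simp only [List.foldl_cons]
    rw [show min (min a b) x = min (min a x) b by omega, ih]

theorem pv_foldl_max_comm (l : List Int) : ∀ a b : Int, l.foldl max (max a b) = max (l.foldl max a) b := by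
  induction l with
  | nil => intro a b; simp
  | cons x l ih =>
    intro a b
    simp only [List.foldl_cons]
    rw [show max (max a b) x = max (max a x) b by omega, ih]

theorem pv_minstep_some (l : List Int) : ∀ m : Int, l.foldl pvMinStep (some m) = some (l.foldl min m) := by
  induction l with
  | nil => intro m; simp
  | cons x l ih =>
    intro m
    simp only [List.foldl_cons]
    have h : pvMinStep (some m) x = some (min m x) := by
      show (if x < m then some x else some m) = some (min m x)
      by_cases h : x < m
      · rw [if_pos h]; congr 1; omega
      · rw [if_neg h]; congr 1; omega
    rw [h, ih]

theorem pv_maxstep_some (l : List Int) : ∀ m : Int, l.foldl pvMaxStep (some m) = some (l.foldl max m) := by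
  induction l with
  | nil => intro m; simp
  | cons x l ih =>
    intro m
    simp only [List.foldl_cons]
    have h : pvMaxStep (some m) x = some (max m x) := by
      show (if m < x then some x else some m) = some (max m x)
      by_cases h : m < x
      · rw [if_pos h]; congr 1; omega
      · rw [if_neg h]; congr 1; omega
    rw [h, ih]

theorem pv_minD_cons (x : Int) (l : List Int) :
    PySem.List.minD (x :: l) id 0 = l.foldl min x := by
  have hrep : ∀ (l' : List Int), PySem.List.min? l' id = l'.foldl pvMinStep none := by
    intro l'
    unfold PySem.List.min?
    congr 1
    funext acc z
    cases acc <;> rfl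
  simp only [PySem.List.minD, hrep, List.foldl_cons]
  show (List.foldl pvMinStep (pvMinStep none x) l).getD 0 = _
  rw [show pvMinStep none x = some x from rfl, pv_minstep_some]
  rfl

theorem pv_maxD_cons (x : Int) (l : List Int) :
    PySem.List.maxD (x :: l) id 0 = l.foldl max x := by
  have hrep : ∀ (l' : List Int), PySem.List.max? l' id = l'.foldl pvMaxStep none := by
    intro l'
    unfold PySem.List.max?
    congr 1
    funext acc z
    cases acc <;> rfl
  simp only [PySem.List.maxD, hrep, List.foldl_cons]
  show (List.foldl pvMaxStep (pvMaxStep none x) l).getD 0 = _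
  rw [show pvMaxStep none x = some x from rfl, pv_maxstep_some]
  rfl

theorem pv_foldl_min_le_init (l : List Int) : ∀ a : Int, l.foldl min a ≤ a := by
  induction l with
  | nil => intro a; simp
  | cons x l ih =>
    intro a
    simp only [List.foldl_cons]
    have := ih (min a x)
    omega

theorem pv_foldl_min_le_mem (l : List Int) : ∀ a x : Int, x ∈ l → l.foldl min a ≤ x := by
  induction l with
  | nil => intro a x hx; simp at hx
  | cons y l ih =>
    intro a x hx
    simp only [List.foldl_cons]
    rcases List.mem_cons.mp hx with h | h
    · subst h
      have := pv_foldl_min_le_init l (min a x)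
      omega
    · exact ih _ _ h

theorem pv_le_foldl_max_init (l : List Int) : ∀ a : Int, a ≤ l.foldl max a := by
  induction l with
  | nil => intro a; simp
  | cons x l ih =>
    intro a
    simp only [List.foldl_cons]
    have := ih (max a x)
    omega

theorem pv_le_foldl_max_mem (l : List Int) : ∀ a x : Int, x ∈ l → x ≤ l.foldl max a := by
  induction l with
  | nil => intro a x hx; simp at hx
  | cons y l ih =>
    intro a x hx
    simp only [List.foldl_cons]
    rcases List.mem_cons.mp hx with h | h
    · subst h
      have := pv_le_foldl_max_init l (max a x)
      omega
    · exact ih _ _ h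

theorem pv_le_foldl_max_cons (a : Int) (l : List Int) (x : Int) (hx : x ∈ a :: l) :
    x ≤ l.foldl max a := by
  rcases List.mem_cons.mp hx with h | h
  · subst h; exact pv_le_foldl_max_init l x
  · exact pv_le_foldl_max_mem l a x h

theorem pv_foldl_max_neg (l : List Int) : ∀ a : Int, a < 0 → (∀ x ∈ l, x < 0) →
    l.foldl max a < 0 := by
  induction l with
  | nil => intro a ha _; simpa using ha
  | cons x l ih =>
    intro a ha hl
    simp only [List.foldl_cons]
    have hx : x < 0 := hl x List.mem_cons_self
    exact ih (max a x) (by omega) (fun z hz => hl z (List.mem_cons_of_mem _ hz))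

theorem pv_dims_fold (pts : List (List Int)) :
    ∀ a b c d : Int,
    pts.foldl (fun (st : Int × Int × Int × Int) p =>
        let (x, y) := pvUnpack2 p
        let (min_x, max_x, min_y, max_y) := st
        let min_x := if x < min_x then x else min_x
        let max_x := if x > max_x then x else max_x
        let min_y := if y < min_y then y else min_y
        let max_y := if y > max_y then y else max_y
        (min_x, max_x, min_y, max_y)) (a, b, c, d)
    = ((pts.map (fun p => (pvUnpack2 p).1)).foldl min a,
       (pts.map (fun p => (pvUnpack2 p).1)).foldl max b,
       (pts.map (fun p => (pvUnpack2 p).2)).foldl min c,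
       (pts.map (fun p => (pvUnpack2 p).2)).foldl max d) := by
  induction pts with
  | nil => intro a b c d; simp
  | cons p pts ih =>
    intro a b c d
    simp only [List.foldl_cons, List.map_cons]
    rw [show (if (pvUnpack2 p).1 < a then (pvUnpack2 p).1 else a) = min a (pvUnpack2 p).1 by omega,
        show (if (pvUnpack2 p).1 > b then (pvUnpack2 p).1 else b) = max b (pvUnpack2 p).1 by omega,
        show (if (pvUnpack2 p).2 < c then (pvUnpack2 p).2 else c) = min c (pvUnpack2 p).2 by omega,
        show (if (pvUnpack2 p).2 > d then (pvUnpack2 p).2 else d) = max d (pvUnpack2 p).2 by omega]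
    exact ih _ _ _ _

theorem pv_dims_eq (paths : List (List (List Int))) :
    get_dimensions_from_paths paths = [pvMnx paths, pvMxx paths, pvMny paths, pvMxy paths] := by
  unfold get_dimensions_from_paths
  rw [← List.foldl_flatten, pv_dims_fold]
  simp [pvMnx, pvMxx, pvMny, pvMxy, pvXs, pvYs]

-- point coordinate bounds
theorem pv_point_bounds (paths : List (List (List Int))) (p : List Int)
    (hp : p ∈ paths.flatten) :
    pvMnx paths ≤ (pvUnpack2 p).1 ∧ (pvUnpack2 p).1 ≤ pvMxx paths ∧
    pvMny paths ≤ (pvUnpack2 p).2 ∧ (pvUnpack2 p).2 ≤ pvMxy paths := by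
  have hx : (pvUnpack2 p).1 ∈ pvXs paths := List.mem_map_of_mem hp
  have hy : (pvUnpack2 p).2 ∈ pvYs paths := List.mem_map_of_mem hp
  exact ⟨pv_foldl_min_le_mem _ _ _ hx, pv_le_foldl_max_mem _ _ _ hx,
         pv_foldl_min_le_mem _ _ _ hy, pv_le_foldl_max_mem _ _ _ hy⟩

theorem pv_cell_bounds (paths : List (List (List Int))) (c : Int × Int)
    (hc : c ∈ pvCells paths) :
    pvMnx paths ≤ c.1 ∧ c.1 ≤ pvMxx paths ∧ pvMny paths ≤ c.2 ∧ c.2 ≤ pvMxy paths := by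
  rcases List.mem_flatMap.mp hc with ⟨path, hpath, hc1⟩
  rcases List.mem_flatMap.mp hc1 with ⟨pq, hpq, hc2⟩
  obtain ⟨hp1, hp2t⟩ := List.of_mem_zip (show (pq.1, pq.2) ∈ path.zip path.tail from hpq)
  have hp1f : pq.1 ∈ paths.flatten := List.mem_flatten.mpr ⟨path, hpath, hp1⟩
  have hp2f : pq.2 ∈ paths.flatten := List.mem_flatten.mpr ⟨path, hpath, List.mem_of_mem_tail hp2t⟩
  obtain ⟨b11, b12, b13, b14⟩ := pv_point_bounds paths pq.1 hp1f
  obtain ⟨b21, b22, b23, b24⟩ := pv_point_bounds paths pq.2 hp2f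
  simp only [pvSegCells] at hc2
  split_ifs at hc2 with h1 h2
  · rcases List.mem_map.mp hc2 with ⟨y, hyr, rfl⟩
    rw [PySem.List.mem_pyRange_one] at hyr
    refine ⟨b11, b12, ?_, ?_⟩ <;> simp <;> omega
  · rcases List.mem_map.mp hc2 with ⟨x, hxr, rfl⟩
    rw [PySem.List.mem_pyRange_one] at hxr
    refine ⟨?_, ?_, b13, b14⟩ <;> simp <;> omega
  · simp at hc2

-- B's boxes accumulator is pvBoxes
theorem pv_boxes_eq (paths : List (List (List Int))) :
    paths.foldl (fun bs path =>
      (path.zip (PySem.List.slice path (some 1) none)).foldl (fun bs pq =>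
        let (ax, ay) := pvUnpack2 pq.1
        let (bx, by_) := pvUnpack2 pq.2
        if ax = bx ∨ ay = by_ then
          bs ++ [(min ax bx, min ay by_, max ax bx, max ay by_)]
        else bs) bs) []
    = pvBoxes paths := by
  have hstep : ∀ (bs : List (Int × Int × Int × Int)) (pq : List Int × List Int),
      (let (ax, ay) := pvUnpack2 pq.1
       let (bx, by_) := pvUnpack2 pq.2
       if ax = bx ∨ ay = by_ then
         bs ++ [(min ax bx, min ay by_, max ax bx, max ay by_)]
       else bs)
      = bs ++ pvSegBoxes pq.1 pq.2 := by
    intro bs pq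
    simp only [pvSegBoxes]
    split_ifs <;> simp
  have hinner : ∀ (path : List (List Int)) (bs : List (Int × Int × Int × Int)),
      (path.zip (PySem.List.slice path (some 1) none)).foldl (fun bs pq =>
        let (ax, ay) := pvUnpack2 pq.1
        let (bx, by_) := pvUnpack2 pq.2
        if ax = bx ∨ ay = by_ then
          bs ++ [(min ax bx, min ay by_, max ax bx, max ay by_)]
        else bs) bs
      = bs ++ (path.zip path.tail).flatMap (fun pq => pvSegBoxes pq.1 pq.2) := by
    intro path bs
    rw [PySem.List.slice_from_one]
    rw [PySem.List.foldl_congr_mem _ _ _ bs (fun acc pq _ => hstep acc pq)]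
    exact PySem.List.foldl_append_eq_flatMap _ _ _
  calc paths.foldl _ [] = [] ++ pvBoxes paths := by
        unfold pvBoxes
        rw [PySem.List.foldl_congr_mem _ _ _ [] (fun acc path _ => hinner path acc)]
        exact PySem.List.foldl_append_eq_flatMap _ _ _
    _ = pvBoxes paths := List.nil_append _

-- per segment: box coverage is exactly rasterised membership
theorem pv_cover_seg (p q : List Int) (x y : Int) :
    (∃ b ∈ pvSegBoxes p q, pvCoverB b x y = true) ↔ (x, y) ∈ pvSegCells p q := by
  simp only [pvSegBoxes, pvSegCells, pvCoverB]
  by_cases h1 : (pvUnpack2 p).1 = (pvUnpack2 q).1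
  · rw [if_pos (Or.inl h1), if_pos h1]
    simp only [List.mem_singleton, List.mem_map, PySem.List.mem_pyRange_one]
    constructor
    · rintro ⟨b, rfl, hb⟩
      simp only [Bool.and_eq_true, decide_eq_true_eq] at hb
      exact ⟨y, by omega, by rw [Prod.ext_iff]; constructor <;> simp <;> omega⟩
    · rintro ⟨y', hy', hxy⟩
      rw [Prod.ext_iff] at hxy
      simp only at hxy
      refine ⟨_, rfl, ?_⟩
      simp only [Bool.and_eq_true, decide_eq_true_eq]
      omega
  · by_cases h2 : (pvUnpack2 p).2 = (pvUnpack2 q).2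
    · rw [if_pos (Or.inr h2), if_neg h1, if_pos h2]
      simp only [List.mem_singleton, List.mem_map, PySem.List.mem_pyRange_one]
      constructor
      · rintro ⟨b, rfl, hb⟩
        simp only [Bool.and_eq_true, decide_eq_true_eq] at hb
        exact ⟨x, by omega, by rw [Prod.ext_iff]; constructor <;> simp <;> omega⟩
      · rintro ⟨x', hx', hxy⟩
        rw [Prod.ext_iff] at hxy
        simp only at hxy
        refine ⟨_, rfl, ?_⟩
        simp only [Bool.and_eq_true, decide_eq_true_eq]
        omega
    · rw [if_neg (by tauto), if_neg h1, if_neg h2]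
      simp
 
theorem pv_cover_iff (paths : List (List (List Int))) (x y : Int) :
    ((pvBoxes paths).any (fun b => pvCoverB b x y) = true) ↔ (x, y) ∈ pvCells paths := by
  rw [List.any_eq_true]
  unfold pvBoxes pvCells
  simp only [List.mem_flatMap]
  constructor
  · rintro ⟨b, ⟨path, hpath, pq, hpq, hb⟩, hc⟩
    exact ⟨path, hpath, pq, hpq, (pv_cover_seg pq.1 pq.2 x y).mp ⟨b, hb, hc⟩⟩
  · rintro ⟨path, hpath, pq, hpq, hc⟩
    rcases (pv_cover_seg pq.1 pq.2 x y).mpr hc with ⟨b, hb, hcov⟩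
    exact ⟨b, ⟨path, hpath, pq, hpq, hb⟩, hcov⟩

-- A's index loop over a path is the loop over adjacent pairs
theorem pv_adjacent_foldl {γ : Type} (F : γ → List Int → List Int → γ) :
    ∀ (path : List (List Int)) (g : γ),
    (List.range (path.length - 1)).foldl
      (fun g i => F g (path.getD i []) (path.getD (i + 1) [])) g
    = (path.zip path.tail).foldl (fun g pq => F g pq.1 pq.2) g := by
  intro path
  induction path with
  | nil => intro g; simp
  | cons p rest ih =>
    intro g
    cases rest with
    | nil => simp
    | cons q rest' =>
      show (List.range (rest'.length + 1)).foldl _ g = _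
      simp only [List.range_succ_eq_map, List.foldl_cons, List.foldl_map,
        List.getD_cons_zero, List.getD_cons_succ, List.tail_cons, List.zip_cons_cons]
      exact ih (F g p q)

-- grid facts
theorem pv_keys_gridOf (mnx mxx mny mxy : Int) (f : Int → Int → String) :
    (pvGridOf mnx mxx mny mxy f).keys = PySem.List.pyRange mnx (mxx + 1) 1 := by
  unfold pvGridOf
  rw [PySem.Dict.keys_mk, List.map_map]
  show List.map (fun x => x) _ = _
  exact List.map_id _

theorem pv_setCell_gridOf (mnx mxx mny mxy : Int) (f : Int → Int → String) (x y : Int) (v : String)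
    (hx : x ∈ PySem.List.pyRange mnx (mxx + 1) 1) (hy : y ∈ PySem.List.pyRange mny (mxy + 1) 1) :
    pvSetCell (pvGridOf mnx mxx mny mxy f) x y v
      = pvGridOf mnx mxx mny mxy (fun u w => if u = x ∧ w = y then v else f u w) := by
  have hXnd := PySem.List.nodup_pyRange_one mnx (mxx + 1)
  have hYnd := PySem.List.nodup_pyRange_one mny (mxy + 1)
  have hknd : (pvGridOf mnx mxx mny mxy f).keys.Nodup := by
    rw [pv_keys_gridOf]; exact hXnd
  have hmem : (x, pvRowOf mny mxy f x) ∈ (pvGridOf mnx mxx mny mxy f).items :=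
    List.mem_map_of_mem hx
  have hgetD := PySem.Dict.getD_of_mem_items _ hmem hknd PySem.Dict.empty
  have hcont : (pvGridOf mnx mxx mny mxy f).contains x = true := by
    rw [PySem.Dict.contains_iff_mem_keys, pv_keys_gridOf]; exact hx
  have hrowcont : (pvRowOf mny mxy f x).contains y = true := by
    rw [PySem.Dict.contains_iff_mem_keys]
    unfold pvRowOf
    rw [PySem.Dict.keys_mk, List.map_map]
    simpa using hy
  have hrow : (pvRowOf mny mxy f x).insert y v
      = pvRowOf mny mxy (fun u w => if u = x ∧ w = y then v else f u w) x := by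
    apply PySem.Dict.ext
    rw [PySem.Dict.items_insert_of_contains _ _ hrowcont]
    show List.map _ (List.map _ _) = List.map _ _
    rw [List.map_map]
    apply List.map_congr_left
    intro w hw
    by_cases hwy : w = y
    · subst hwy; simp
    · simp [hwy]
  apply PySem.Dict.ext
  unfold pvSetCell
  rw [hgetD, PySem.Dict.items_insert_of_contains _ _ hcont]
  show List.map _ (List.map _ _) = List.map _ _
  rw [List.map_map]
  apply List.map_congr_left
  intro u hu
  by_cases hux : u = x
  · subst hux
    simpa using hrow
  · simp only [Function.comp_apply, beq_iff_eq, hux, if_false]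
    have : pvRowOf mny mxy f u = pvRowOf mny mxy (fun u w => if u = x ∧ w = y then v else f u w) u := by
      unfold pvRowOf
      congr 1
      apply List.map_congr_left
      intro w hw
      simp [hux]
    rw [this]

theorem pv_gridOf_congr (mnx mxx mny mxy : Int) (f f' : Int → Int → String)
    (h : ∀ x ∈ PySem.List.pyRange mnx (mxx + 1) 1, ∀ y ∈ PySem.List.pyRange mny (mxy + 1) 1,
      f x y = f' x y) :
    pvGridOf mnx mxx mny mxy f = pvGridOf mnx mxx mny mxy f' := by
  unfold pvGridOf
  congr 1
  apply List.map_congr_left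
  intro x hx
  have : pvRowOf mny mxy f x = pvRowOf mny mxy f' x := by
    unfold pvRowOf
    congr 1
    apply List.map_congr_left
    intro y hy
    rw [h x hx y hy]
  rw [this]

theorem pv_foldl_setCell_cells (mnx mxx mny mxy : Int) :
    ∀ (cs : List (Int × Int)) (f : Int → Int → String),
    (∀ c ∈ cs, c.1 ∈ PySem.List.pyRange mnx (mxx + 1) 1 ∧ c.2 ∈ PySem.List.pyRange mny (mxy + 1) 1) →
    cs.foldl (fun g c => pvSetCell g c.1 c.2 "#") (pvGridOf mnx mxx mny mxy f)
      = pvGridOf mnx mxx mny mxy (fun u w => if (u, w) ∈ cs then "#" else f u w) := by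
  intro cs
  induction cs with
  | nil => intro f _; simp
  | cons c cs ih =>
    intro f h
    simp only [List.foldl_cons]
    obtain ⟨hc1, hc2⟩ := h c (List.mem_cons_self)
    rw [pv_setCell_gridOf mnx mxx mny mxy f c.1 c.2 "#" hc1 hc2]
    rw [ih _ (fun c' hc' => h c' (List.mem_cons_of_mem _ hc'))]
    apply pv_gridOf_congr
    intro u hu w hw
    by_cases hin : (u, w) ∈ cs
    · simp [hin]
    · have hmc : ((u, w) ∈ c :: cs) ↔ (u = c.1 ∧ w = c.2) := by
        rw [List.mem_cons]
        simp [hin, Prod.ext_iff]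
      by_cases hc : u = c.1 ∧ w = c.2 <;> simp [hin, hc, hmc]

-- fuse A's inner assignment loop into one insert of the finished row
theorem pv_row_fuse (x : Int) (v : String) :
    ∀ (Y : List Int) (g : PySem.Dict Int (PySem.Dict Int String)), Y ≠ [] →
    Y.foldl (fun g y => pvSetCell g x y v) g
    = g.insert x (Y.foldl (fun r y => r.insert y v) (g.getD x PySem.Dict.empty)) := by
  intro Y
  induction Y with
  | nil => intro g h; exact absurd rfl h
  | cons y Y ih =>
    intro g _
    cases Y with
    | nil => rfl
    | cons y' Y' =>
      simp only [List.foldl_cons]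
      have hstep : pvSetCell g x y v = g.insert x ((g.getD x PySem.Dict.empty).insert y v) := rfl
      rw [hstep]
      have h2 := ih (g.insert x ((g.getD x PySem.Dict.empty).insert y v)) (by simp)
      simp only [List.foldl_cons] at h2
      rw [h2, PySem.Dict.getD_insert_self, PySem.Dict.insert_insert_self]

-- a row built by inserting fresh keys from the empty dict
theorem pv_row_build (mny mxy : Int) (f : Int → Int → String) (x : Int) :
    (PySem.List.pyRange mny (mxy + 1) 1).foldl (fun r y => r.insert y (f x y)) PySem.Dict.empty
    = pvRowOf mny mxy f x := by
  apply PySem.Dict.ext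
  rw [PySem.Dict.items_foldl_insert_fresh (PySem.List.pyRange mny (mxy + 1) 1)
      (fun y => y) (fun y => f x y) PySem.Dict.empty
      (fun a _ => PySem.Dict.contains_empty a)
      (by simpa using PySem.List.nodup_pyRange_one mny (mxy + 1))]
  rfl

theorem pv_buildA_gen (mny mxy : Int) (hy : mny ≤ mxy) :
    ∀ (X : List Int), X.Nodup →
    ∀ (g : PySem.Dict Int (PySem.Dict Int String)), (∀ x ∈ X, g.contains x = false) →
    (X.foldl (fun g x =>
        (PySem.List.pyRange mny (mxy + 1) 1).foldl (fun g y => pvSetCell g x y ".") g) g).items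
    = g.items ++ X.map (fun x => (x, pvRowOf mny mxy (fun _ _ => ".") x)) := by
  have hYne : PySem.List.pyRange mny (mxy + 1) 1 ≠ [] := by
    have : mny ∈ PySem.List.pyRange mny (mxy + 1) 1 :=
      PySem.List.mem_pyRange_one.mpr ⟨le_refl _, by omega⟩
    exact List.ne_nil_of_mem this
  intro X
  induction X with
  | nil => intro _ g _; simp
  | cons x X ih =>
    intro hnd g hfresh
    simp only [List.foldl_cons]
    rw [pv_row_fuse x "." _ g hYne,
        PySem.Dict.getD_of_not_contains g _ (hfresh x List.mem_cons_self),
        pv_row_build mny mxy (fun _ _ => ".") x]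
    rw [ih (List.nodup_cons.mp hnd).2 _ (by
      intro x' hx'
      rw [PySem.Dict.contains_insert]
      have hne : x' ≠ x := by
        intro hxx
        exact (List.nodup_cons.mp hnd).1 (hxx ▸ hx')
      simp [hne, hfresh x' (List.mem_cons_of_mem _ hx')])]
    rw [PySem.Dict.items_insert_of_not_contains g _ (hfresh x List.mem_cons_self)]
    simp

-- A's first phase builds the all-dots grid
theorem pv_buildA (mnx mxx mny mxy : Int) (hy : mny ≤ mxy) :
    (PySem.List.pyRange mnx (mxx + 1) 1).foldl (fun g x =>
        (PySem.List.pyRange mny (mxy + 1) 1).foldl (fun g y => pvSetCell g x y ".") g)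
      PySem.Dict.empty
    = pvGridOf mnx mxx mny mxy (fun _ _ => ".") := by
  apply PySem.Dict.ext
  rw [pv_buildA_gen mny mxy hy _ (PySem.List.nodup_pyRange_one mnx (mxx + 1))
      PySem.Dict.empty (fun a _ => PySem.Dict.contains_empty a)]
  rfl

-- B's build is the grid with the coverage test
theorem pv_buildB (mnx mxx mny mxy : Int) (t : Int → Int → Bool) :
    (PySem.List.pyRange mnx (mxx + 1) 1).foldl (fun g x =>
        g.insert x ((PySem.List.pyRange mny (mxy + 1) 1).foldl (fun r y =>
          r.insert y (if t x y then "#" else ".")) PySem.Dict.empty))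
      PySem.Dict.empty
    = pvGridOf mnx mxx mny mxy (fun x y => if t x y then "#" else ".") := by
  apply PySem.Dict.ext
  rw [PySem.Dict.items_foldl_insert_fresh (PySem.List.pyRange mnx (mxx + 1) 1)
      (fun x => x)
      (fun x => (PySem.List.pyRange mny (mxy + 1) 1).foldl (fun r y =>
        r.insert y (if t x y then "#" else ".")) PySem.Dict.empty)
      PySem.Dict.empty
      (fun a _ => PySem.Dict.contains_empty a)
      (by simpa using PySem.List.nodup_pyRange_one mnx (mxx + 1))]
  show [] ++ _ = List.map _ _
  rw [List.nil_append]
  apply List.map_congr_left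
  intro x hx
  rw [pv_row_build mny mxy (fun x y => if t x y then "#" else ".") x]

-- fold over a flatMap is the nested fold
theorem pv_foldl_flatMap {α β γ : Type} (l : List α) (h : α → List β) (f : γ → β → γ) (b : γ) :
    (l.flatMap h).foldl f b = l.foldl (fun b a => (h a).foldl f b) b := by
  rw [List.flatMap_def, List.foldl_flatten, List.foldl_map]

-- one segment's if-chain is the fold of pvSetCell over its cells
theorem pv_seg_foldl (g : PySem.Dict Int (PySem.Dict Int String)) (p q : List Int) :
    (let (start_x, start_y) := pvUnpack2 p
     let (end_x, end_y) := pvUnpack2 q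
     if start_x = end_x then
       (PySem.List.pyRange (min start_y end_y) (max start_y end_y + 1) 1).foldl
         (fun g y => pvSetCell g start_x y "#") g
     else if start_y = end_y then
       (PySem.List.pyRange (min start_x end_x) (max start_x end_x + 1) 1).foldl
         (fun g x => pvSetCell g x start_y "#") g
     else g)
    = (pvSegCells p q).foldl (fun g c => pvSetCell g c.1 c.2 "#") g := by
  simp only [pvSegCells]
  split_ifs with h1 h2
  · rw [List.foldl_map]
  · rw [List.foldl_map]
  · rfl

-- A's second phase is the fold of pvSetCell over all wall cells
theorem pv_phase2 (paths : List (List (List Int)))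
    (g : PySem.Dict Int (PySem.Dict Int String)) :
    paths.foldl (fun g path =>
      (PySem.List.pyRange 0 (PySem.List.len path - 1) 1).foldl (fun g i =>
        let (start_x, start_y) := pvUnpack2 (PySem.List.pyGetD path i [])
        let (end_x, end_y) := pvUnpack2 (PySem.List.pyGetD path (i + 1) [])
        if start_x = end_x then
          (PySem.List.pyRange (min start_y end_y) (max start_y end_y + 1) 1).foldl
            (fun g y => pvSetCell g start_x y "#") g
        else if start_y = end_y then
          (PySem.List.pyRange (min start_x end_x) (max start_x end_x + 1) 1).foldl
            (fun g x => pvSetCell g x start_y "#") g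
        else g) g) g
    = (pvCells paths).foldl (fun g c => pvSetCell g c.1 c.2 "#") g := by
  unfold pvCells
  rw [pv_foldl_flatMap]
  apply PySem.List.foldl_congr_mem
  intro g' path _
  rw [pv_foldl_flatMap]
  have hidx : (PySem.List.pyRange 0 (PySem.List.len path - 1) 1)
      = (List.range (path.length - 1)).map (fun (k : Nat) => (k : Int)) := by
    rw [PySem.List.pyRange_one]
    have h0 : (PySem.List.len path - 1 - 0).toNat = path.length - 1 := by
      simp only [PySem.List.len_eq]
      omega
    rw [h0]
    apply List.map_congr_left
    intro k _
    simp
  rw [hidx, List.foldl_map]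
  have hbody : ∀ (k : Nat), k ∈ List.range (path.length - 1) →
      ∀ (g : PySem.Dict Int (PySem.Dict Int String)),
      (fun g (i : Int) =>
        let (start_x, start_y) := pvUnpack2 (PySem.List.pyGetD path i [])
        let (end_x, end_y) := pvUnpack2 (PySem.List.pyGetD path (i + 1) [])
        if start_x = end_x then
          (PySem.List.pyRange (min start_y end_y) (max start_y end_y + 1) 1).foldl
            (fun g y => pvSetCell g start_x y "#") g
        else if start_y = end_y then
          (PySem.List.pyRange (min start_x end_x) (max start_x end_x + 1) 1).foldl
            (fun g x => pvSetCell g x start_y "#") g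
        else g) g ((k : Int))
      = (fun g (i : Nat) =>
        (pvSegCells (path.getD i []) (path.getD (i + 1) [])).foldl
          (fun g c => pvSetCell g c.1 c.2 "#") g) g k := by
    intro k _ g
    show (let (start_x, start_y) := pvUnpack2 (PySem.List.pyGetD path (k : Int) [])
          let (end_x, end_y) := pvUnpack2 (PySem.List.pyGetD path ((k : Int) + 1) [])
          if start_x = end_x then
            (PySem.List.pyRange (min start_y end_y) (max start_y end_y + 1) 1).foldl
              (fun g y => pvSetCell g start_x y "#") g
          else if start_y = end_y then
            (PySem.List.pyRange (min start_x end_x) (max start_x end_x + 1) 1).foldl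
              (fun g x => pvSetCell g x start_y "#") g
          else g) = _
    rw [show ((k : Int) + 1) = (((k + 1 : Nat)) : Int) by push_cast; ring]
    rw [PySem.List.pyGetD_natCast, PySem.List.pyGetD_natCast]
    exact pv_seg_foldl g (path.getD k []) (path.getD (k + 1) [])
  refine Eq.trans (PySem.List.foldl_congr_mem' _ _ _ g' hbody) ?_
  exact pv_adjacent_foldl (fun g p q =>
    (pvSegCells p q).foldl (fun g c => pvSetCell g c.1 c.2 "#") g) path g'

theorem pv_flatMap_map {α β : Type} (paths : List (List α)) (g : α → β) :
    paths.flatMap (fun path => path.map g) = paths.flatten.map g := by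
  rw [List.flatMap_def, ← List.map_flatten]

-- a 2-point shape
theorem pv_len2 (p : List Int) (h : p.length = 2) : ∃ a b : Int, p = [a, b] := by
  match p, h with
  | [a, b], _ => exact ⟨a, b, rfl⟩

-- under Dom every x coordinate is at most 2^31
theorem pv_dom_x_le (paths : List (List (List Int))) (hdom : Dom_get_start_graph paths) :
    ∀ v ∈ pvXs paths, v ≤ 2147483648 := by
  intro v hv
  rcases List.mem_map.mp hv with ⟨p, hp, rfl⟩
  rcases List.mem_flatten.mp hp with ⟨path, hpath, hpp⟩
  unfold Dom_get_start_graph at hdom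
  simp only [List.all_eq_true, pvDomInt, decide_eq_true_eq] at hdom
  match p with
  | [] => simp [pvUnpack2]
  | [a] => simp [pvUnpack2]
  | [a, b] =>
    have := hdom path hpath [a, b] hpp a (by simp)
    simpa [pvUnpack2] using this.2
  | a :: b :: c :: t => simp [pvUnpack2]

-- a length-2 point's unpacked x is its head
theorem pv_head_eq (p : List Int) (h : p.length = 2) : (pvUnpack2 p).1 = p.headD 0 := by
  rcases pv_len2 p h with ⟨a, b, rfl⟩
  rfl

-- the bound equalities used by both the spec and the tightness proofs
theorem pv_mnx_eq (paths : List (List (List Int))) (hdom : Dom_get_start_graph paths)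
    (x0 : Int) (xl : List Int) (hxs : pvXs paths = x0 :: xl) :
    pvMnx paths = PySem.List.minD (pvXs paths) id 0 := by
  have hx0 : x0 ≤ 2147483648 := pv_dom_x_le paths hdom x0 (hxs ▸ List.mem_cons_self)
  unfold pvMnx
  rw [hxs, pv_minD_cons]
  simp only [List.foldl_cons]
  rw [show min (10000000000 : Int) x0 = x0 by omega]

theorem pv_mny_eq (paths : List (List (List Int)))
    (y0 : Int) (yl : List Int) (hys : pvYs paths = y0 :: yl) :
    pvMny paths = min 0 (PySem.List.minD (pvYs paths) id 0) := by
  unfold pvMny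
  rw [hys, pv_minD_cons]
  simp only [List.foldl_cons]
  rw [show min (0 : Int) y0 = min y0 0 by omega, pv_foldl_min_comm]
  omega

theorem pv_mxy_eq (paths : List (List (List Int)))
    (y0 : Int) (yl : List Int) (hys : pvYs paths = y0 :: yl) :
    pvMxy paths = max 0 (PySem.List.maxD (pvYs paths) id 0) := by
  unfold pvMxy
  rw [hys, pv_maxD_cons]
  simp only [List.foldl_cons]
  rw [show max (0 : Int) y0 = max y0 0 by omega, pv_foldl_max_comm]
  omega

theorem pv_mxx_eq (paths : List (List (List Int)))
    (x0 : Int) (xl : List Int) (hxs : pvXs paths = x0 :: xl)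
    (hnn : ∃ v ∈ pvXs paths, 0 ≤ v) :
    pvMxx paths = PySem.List.maxD (pvXs paths) id 0 := by
  rcases hnn with ⟨v, hv, hv0⟩
  have hle : v ≤ xl.foldl max x0 := pv_le_foldl_max_cons x0 xl v (hxs ▸ hv)
  unfold pvMxx
  rw [hxs, pv_maxD_cons]
  simp only [List.foldl_cons]
  rw [show max (0 : Int) x0 = max x0 0 by omega, pv_foldl_max_comm]
  omega

-- a nonempty path yields a nonempty coordinate list
theorem pv_xs_ne (paths : List (List (List Int))) (h : ∃ path ∈ paths, path ≠ []) :
    pvXs paths ≠ [] ∧ pvYs paths ≠ [] := by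
  rcases h with ⟨path, hpath, hne⟩
  rcases List.exists_mem_of_ne_nil path hne with ⟨p, hp⟩
  have hpf : p ∈ paths.flatten := List.mem_flatten.mpr ⟨path, hpath, hp⟩
  exact ⟨List.ne_nil_of_mem (List.mem_map_of_mem hpf : _ ∈ pvXs paths),
         List.ne_nil_of_mem (List.mem_map_of_mem hpf : _ ∈ pvYs paths)⟩

-- ===== VERDICT PROOFS =====

theorem get_start_graph_spec : Claim_unchanged_get_start_graph := by
  intro paths hdom hpre hD
  show get_start_graph paths = get_start_graph_alt paths
  unfold get_start_graph get_start_graph_alt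
  rw [pv_dims_eq]
  simp only []
  obtain ⟨hex, hlen⟩ := hpre
  obtain ⟨hxne, hyne⟩ := pv_xs_ne paths hex
  rcases List.exists_cons_of_ne_nil hxne with ⟨x0, xl, hxs⟩
  rcases List.exists_cons_of_ne_nil hyne with ⟨y0, yl, hys⟩
  -- ¬D with a nonempty path gives a nonnegative x coordinate
  have hnn : ∃ v ∈ pvXs paths, 0 ≤ v := by
    have : ¬ ∀ path ∈ paths, ∀ p ∈ path, p.headD 0 < 0 := fun h => hD ⟨hex, h⟩
    push Not at this
    rcases this with ⟨path, hpath, p, hp, hhd⟩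
    refine ⟨(pvUnpack2 p).1, List.mem_map_of_mem (List.mem_flatten.mpr ⟨path, hpath, hp⟩), ?_⟩
    rw [pv_head_eq p (hlen path hpath p hp)]
    omega
  rw [pv_boxes_eq, pv_flatMap_map, pv_flatMap_map]
  rw [show paths.flatten.map (fun p => (pvUnpack2 p).1) = pvXs paths from rfl,
      show paths.flatten.map (fun p => (pvUnpack2 p).2) = pvYs paths from rfl]
  rw [← pv_mnx_eq paths hdom x0 xl hxs, ← pv_mxx_eq paths x0 xl hxs hnn,
      ← pv_mny_eq paths y0 yl hys, ← pv_mxy_eq paths y0 yl hys]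
  have hmny0 : pvMny paths ≤ 0 := pv_foldl_min_le_init _ _
  have hmxy0 : (0 : Int) ≤ pvMxy paths := pv_le_foldl_max_init _ _
  rw [pv_buildA (pvMnx paths) (pvMxx paths) (pvMny paths) (pvMxy paths) (by omega)]
  rw [pv_phase2]
  rw [pv_foldl_setCell_cells (pvMnx paths) (pvMxx paths) (pvMny paths) (pvMxy paths)
      (pvCells paths) (fun _ _ => ".") (by
        intro c hc
        obtain ⟨b1, b2, b3, b4⟩ := pv_cell_bounds paths c hc
        exact ⟨PySem.List.mem_pyRange_one.mpr ⟨b1, by omega⟩,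
               PySem.List.mem_pyRange_one.mpr ⟨b3, by omega⟩⟩)]
  rw [pv_buildB (pvMnx paths) (pvMxx paths) (pvMny paths) (pvMxy paths)]
  congr 2
  congr 1
  apply pv_gridOf_congr
  intro u hu w hw
  have hcov := pv_cover_iff paths u w
  by_cases hin : (u, w) ∈ pvCells paths
  · rw [if_pos hin, if_pos (by
      simpa only [pvCoverB] using hcov.mpr hin)]
  · rw [if_neg hin, if_neg (by
      intro h
      exact hin (hcov.mp (by simpa only [pvCoverB] using h)))]

theorem get_start_graph_changed : Claim_changed_get_start_graph := by
  unfold Claim_changed_get_start_graph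
  exact ⟨by decide, by decide, by decide, by decide, by decide, by decide⟩

theorem get_start_graph_tight : Claim_exact_get_start_graph := by
  intro paths hdom hpre hD heq
  obtain ⟨hex, hlen⟩ := hpre
  obtain ⟨hxne, _⟩ := pv_xs_ne paths hex
  rcases List.exists_cons_of_ne_nil hxne with ⟨x0, xl, hxs⟩
  -- all x coordinates are negative
  have hneg : ∀ v ∈ pvXs paths, v < 0 := by
    intro v hv
    rcases List.mem_map.mp hv with ⟨p, hp, rfl⟩
    rcases List.mem_flatten.mp hp with ⟨path, hpath, hpp⟩
    rw [pv_head_eq p (hlen path hpath p hpp)]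
    exact hD.2 path hpath p hpp
  -- compare the second (max_x) entry of the returned dimension lists
  have hsnd : (get_start_graph paths).2 = (get_start_graph_alt paths).2 := congrArg Prod.snd heq
  have hA2 : (get_start_graph paths).2 = [pvMnx paths, pvMxx paths, pvMny paths, pvMxy paths] := by
    unfold get_start_graph
    rw [pv_dims_eq]
  have hB2 : (get_start_graph_alt paths).2
      = [PySem.List.minD (paths.flatMap (fun path => path.map (fun p => (pvUnpack2 p).1))) id 0,
         PySem.List.maxD (paths.flatMap (fun path => path.map (fun p => (pvUnpack2 p).1))) id 0,
         min 0 (PySem.List.minD (paths.flatMap (fun path => path.map (fun p => (pvUnpack2 p).2))) id 0),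
         max 0 (PySem.List.maxD (paths.flatMap (fun path => path.map (fun p => (pvUnpack2 p).2))) id 0)] := rfl
  rw [pv_flatMap_map, pv_flatMap_map,
      show paths.flatten.map (fun p => (pvUnpack2 p).1) = pvXs paths from rfl,
      show paths.flatten.map (fun p => (pvUnpack2 p).2) = pvYs paths from rfl] at hB2
  rw [hA2, hB2] at hsnd
  simp only [List.cons.injEq, and_true] at hsnd
  have hAx : pvMxx paths = PySem.List.maxD (pvXs paths) id 0 := hsnd.2.1
  have h1 : (0 : Int) ≤ pvMxx paths := pv_le_foldl_max_init _ _
  have h2 : PySem.List.maxD (pvXs paths) id 0 < 0 := by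
    rw [hxs, pv_maxD_cons]
    exact pv_foldl_max_neg xl x0 (hneg x0 (hxs ▸ List.mem_cons_self))
      (fun z hz => hneg z (hxs ▸ List.mem_cons_of_mem _ hz))
  omega
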